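-- pv_equiv track=rewrite | github.com/EugeniuZ/Advent-of-Code-2024 | 07/solution.py | check_eq
-- ===== SOURCE A (Python) =====
-- def check_eq(ns, tv, cv, ops):
--     if cv == tv:
--         return ops
--     if cv > tv:
--         return
--     if not ns:
--         return
--     op = ns[0]
--     return check_eq(ns[1:], tv, cv * op, ops + f'*{op}' ) or check_eq(ns[1:], tv, cv + op, ops + f'+{op}')
-- ===== SOURCE B (Python) =====
-- def check_eq(ns, tv, cv, ops):
--     stack = [(ns, cv, ops)]
--     while stack:
--         ns_, cv_, ops_ = stack.pop()
--         if cv_ == tv: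
--             return ops_
--         if cv_ > tv:
--             continue
--         if not ns_:
--             continue
--         op = ns_[0]
--         rest = ns_[1:]
--         stack.append((rest, cv_ + op, ops_ + f'+{op}'))
--         stack.append((rest, cv_ * op, ops_ + f'*{op}'))
--     return None
-- ===== Notes on version B (the rewrite author's own statement) =====
-- stated objective: alternative
-- what changed: The recursive DFS with `or` short-circuiting is rewritten as an iterative while-loop over an explicit LIFO stack, pushing the '+' successor before the '*' successor so the multiply branch is explored first.
import Mathlib
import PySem

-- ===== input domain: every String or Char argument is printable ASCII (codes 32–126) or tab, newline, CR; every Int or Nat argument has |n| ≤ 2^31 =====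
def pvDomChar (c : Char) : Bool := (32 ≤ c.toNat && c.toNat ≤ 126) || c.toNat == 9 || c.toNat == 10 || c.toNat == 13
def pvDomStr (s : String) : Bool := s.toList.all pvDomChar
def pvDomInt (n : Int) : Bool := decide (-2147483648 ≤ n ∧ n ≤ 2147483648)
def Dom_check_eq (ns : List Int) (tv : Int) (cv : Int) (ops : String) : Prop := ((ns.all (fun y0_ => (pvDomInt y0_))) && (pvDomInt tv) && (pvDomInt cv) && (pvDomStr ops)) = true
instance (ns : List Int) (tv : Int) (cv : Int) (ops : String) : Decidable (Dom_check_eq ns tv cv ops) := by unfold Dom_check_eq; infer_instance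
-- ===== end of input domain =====

-- B replaces A's recursive DFS by an iterative explicit-stack search (different decomposition, same cost).

-- ===== PORT A =====
-- Python `x or y` is falsy-based: None and "" both fall through to y.
def check_eq (ns : List Int) (tv : Int) (cv : Int) (ops : String) : Option String :=
  if cv = tv then some ops
  else if cv > tv then none
  else
    match ns with
    | [] => none
    | op :: tl =>
      match check_eq tl tv (cv * op) (ops ++ "*" ++ PySem.Int.toStr op) with
      | some s => if s = "" then check_eq tl tv (cv + op) (ops ++ "+" ++ PySem.Int.toStr op) else some s
      | none => check_eq tl tv (cv + op) (ops ++ "+" ++ PySem.Int.toStr op)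

-- ===== PORT B =====
-- measure for the stack loop's termination
def pvStackMeasure (st : List (List Int × Int × String)) : Nat :=
  (st.map (fun s => 3 ^ s.1.length)).sum

theorem pvStackMeasure_cons (f : List Int × Int × String) (rest : List (List Int × Int × String)) :
    pvStackMeasure (f :: rest) = 3 ^ f.1.length + pvStackMeasure rest := by
  simp [pvStackMeasure]

theorem pvStackMeasure_lt_pop (f : List Int × Int × String) (rest : List (List Int × Int × String)) :
    pvStackMeasure rest < pvStackMeasure (f :: rest) := by
  have := Nat.pow_pos (n := f.1.length) (show 0 < 3 by norm_num)
  rw [pvStackMeasure_cons]; omega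

theorem pvStackMeasure_lt_push (op : Int) (tl : List Int) (cv : Int) (ops : String)
    (a b : List Int × Int × String) (rest : List (List Int × Int × String))
    (ha : a.1 = tl) (hb : b.1 = tl) :
    pvStackMeasure (a :: b :: rest) < pvStackMeasure ((op :: tl, cv, ops) :: rest) := by
  have hp := Nat.pow_pos (n := tl.length) (show 0 < 3 by norm_num)
  rw [pvStackMeasure_cons, pvStackMeasure_cons, pvStackMeasure_cons, ha, hb]
  show 3 ^ tl.length + (3 ^ tl.length + _) < 3 ^ (tl.length + 1) + _
  rw [pow_succ]; omega

-- the while loop over the explicit stack (head = top of stack)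
def check_eq_alt_loop (tv : Int) (st : List (List Int × Int × String)) : Option String :=
  match st with
  | [] => none
  | (ns_, cv_, ops_) :: rest =>
    if cv_ = tv then some ops_
    else if cv_ > tv then check_eq_alt_loop tv rest
    else
      match ns_ with
      | [] => check_eq_alt_loop tv rest
      | op :: tl =>
        -- Python pushes '+' then '*'; the '*' state is on top (list head)
        check_eq_alt_loop tv
          ((tl, cv_ * op, ops_ ++ "*" ++ PySem.Int.toStr op) ::
           (tl, cv_ + op, ops_ ++ "+" ++ PySem.Int.toStr op) :: rest)
  termination_by pvStackMeasure st
  decreasing_by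
  · exact pvStackMeasure_lt_pop _ _
  · exact pvStackMeasure_lt_pop _ _
  · exact pvStackMeasure_lt_push op tl cv_ ops_ _ _ rest rfl rfl

def check_eq_alt (ns : List Int) (tv : Int) (cv : Int) (ops : String) : Option String :=
  check_eq_alt_loop tv [(ns, cv, ops)]

-- ===== PRECONDITION & SPEC =====
def Spec_check_eq (ns : List Int) (tv : Int) (cv : Int) (ops : String) (out : Option String) : Prop := out = check_eq_alt ns tv cv ops
instance (ns : List Int) (tv : Int) (cv : Int) (ops : String) (out : Option String) : Decidable (Spec_check_eq ns tv cv ops out) := by unfold Spec_check_eq; infer_instance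

-- ===== CLAIM (what is proved, stated in full; the proofs are below) =====
def Claim_equal_check_eq : Prop := ∀ (ns : List Int) (tv : Int) (cv : Int) (ops : String), Dom_check_eq ns tv cv ops → Spec_check_eq ns tv cv ops (check_eq ns tv cv ops)

-- ===== LEMMAS AND PROOFS =====

-- one-step unfolding of the loop on a nonempty stack
theorem loop_eq_cons (tv : Int) (ns_ : List Int) (cv_ : Int) (ops_ : String)
    (rest : List (List Int × Int × String)) :
    check_eq_alt_loop tv ((ns_, cv_, ops_) :: rest) =
      (if cv_ = tv then some ops_
       else if cv_ > tv then check_eq_alt_loop tv rest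
       else
         match ns_ with
         | [] => check_eq_alt_loop tv rest
         | op :: tl =>
           check_eq_alt_loop tv
             ((tl, cv_ * op, ops_ ++ "*" ++ PySem.Int.toStr op) ::
              (tl, cv_ + op, ops_ ++ "+" ++ PySem.Int.toStr op) :: rest)) := by
  conv_lhs => rw [check_eq_alt_loop.eq_def]

-- one-step unfolding of A's port on a cons list past the guards
theorem check_eq_cons (tv op : Int) (tl : List Int) (cv : Int) (ops : String)
    (h1 : ¬ cv = tv) (h2 : ¬ cv > tv) :
    check_eq (op :: tl) tv cv ops =
      (match check_eq tl tv (cv * op) (ops ++ "*" ++ PySem.Int.toStr op) with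
       | some s => if s = "" then check_eq tl tv (cv + op) (ops ++ "+" ++ PySem.Int.toStr op) else some s
       | none => check_eq tl tv (cv + op) (ops ++ "+" ++ PySem.Int.toStr op)) := by
  conv_lhs => rw [check_eq]
  simp [h1, h2]

theorem append_star_ne_empty (ops : String) (c : String) (op : Int) (hc : c ≠ "") :
    ops ++ c ++ PySem.Int.toStr op ≠ "" := by
  intro h
  have := congrArg String.toList h
  simp at this
  exact hc this.2.1

-- a result of check_eq with nonempty ops is a nonempty string
theorem check_eq_ne_empty (tv : Int) :
    ∀ (ns : List Int) (cv : Int) (ops : String) (s : String),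
      check_eq ns tv cv ops = some s → ops ≠ "" → s ≠ "" := by
  intro ns
  induction ns with
  | nil =>
    intro cv ops s h hops
    unfold check_eq at h
    split_ifs at h with h1 h2
    cases h; exact hops
  | cons op tl ih =>
    intro cv ops s h hops
    by_cases h1 : cv = tv
    · rw [check_eq, if_pos h1] at h; cases h; exact hops
    · by_cases h2 : cv > tv
      · rw [check_eq, if_neg h1, if_pos h2] at h; exact absurd h (by simp)
      · rw [check_eq_cons tv op tl cv ops h1 h2] at h
        cases hr1 : check_eq tl tv (cv * op) (ops ++ "*" ++ PySem.Int.toStr op) with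
        | none =>
          rw [hr1] at h
          exact ih _ _ _ h (append_star_ne_empty ops "+" op (by simp))
        | some s1 =>
          rw [hr1] at h
          have hs1 : s1 ≠ "" := ih _ _ _ hr1 (append_star_ne_empty ops "*" op (by simp))
          simp only [if_neg hs1] at h
          cases h; exact hs1

-- main invariant: the loop on (frame :: rest) = A's result on the frame, else the loop on rest
theorem loop_cons (tv : Int) :
    ∀ (n : Nat) (ns : List Int) (cv : Int) (ops : String) (rest : List (List Int × Int × String)),
      pvStackMeasure ((ns, cv, ops) :: rest) ≤ n →
      check_eq_alt_loop tv ((ns, cv, ops) :: rest) =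
        (check_eq ns tv cv ops).elim (check_eq_alt_loop tv rest) some := by
  intro n
  induction n with
  | zero =>
    intro ns cv ops rest hm
    exfalso
    have := pvStackMeasure_lt_pop (ns, cv, ops) rest
    omega
  | succ n ih =>
    intro ns cv ops rest hm
    rw [loop_eq_cons]
    by_cases h1 : cv = tv
    · rw [check_eq.eq_def, if_pos h1, if_pos h1]; rfl
    · by_cases h2 : cv > tv
      · rw [check_eq.eq_def, if_neg h1, if_pos h2, if_neg h1, if_pos h2]; rfl
      · rw [if_neg h1, if_neg h2]
        match ns with
        | [] =>
          rw [check_eq.eq_def, if_neg h1, if_neg h2]; rfl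
        | op :: tl =>
          rw [check_eq_cons tv op tl cv ops h1 h2]
          simp only
          have hm1 : pvStackMeasure ((tl, cv * op, ops ++ "*" ++ PySem.Int.toStr op) ::
              (tl, cv + op, ops ++ "+" ++ PySem.Int.toStr op) :: rest) ≤ n := by
            have := pvStackMeasure_lt_push op tl cv ops
              (tl, cv * op, ops ++ "*" ++ PySem.Int.toStr op)
              (tl, cv + op, ops ++ "+" ++ PySem.Int.toStr op) rest rfl rfl
            omega
          have hm2 : pvStackMeasure ((tl, cv + op, ops ++ "+" ++ PySem.Int.toStr op) :: rest) ≤ n := by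
            have h3 := pvStackMeasure_lt_pop (tl, cv * op, ops ++ "*" ++ PySem.Int.toStr op)
              ((tl, cv + op, ops ++ "+" ++ PySem.Int.toStr op) :: rest)
            omega
          rw [ih tl (cv * op) (ops ++ "*" ++ PySem.Int.toStr op) _ hm1]
          cases hr1 : check_eq tl tv (cv * op) (ops ++ "*" ++ PySem.Int.toStr op) with
          | none =>
            simp only [Option.elim]
            exact ih tl (cv + op) (ops ++ "+" ++ PySem.Int.toStr op) rest hm2
          | some s1 =>
            have hs1 : s1 ≠ "" := check_eq_ne_empty tv tl _ _ _ hr1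
              (append_star_ne_empty ops "*" op (by simp))
            simp [hs1]

-- ===== VERDICT (by name: the statement is the Claim_ definition above) =====
theorem check_eq_spec : Claim_equal_check_eq := by
  intro ns tv cv ops _
  unfold Spec_check_eq check_eq_alt
  rw [loop_cons tv (pvStackMeasure [(ns, cv, ops)]) ns cv ops [] le_rfl]
  cases h : check_eq ns tv cv ops with
  | none => simp [check_eq_alt_loop]
  | some s => simp
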